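-- pv_equiv track=rewrite | github.com/WeiChengTW/Peabody-Developmental-Motor-Scales | summer_vacation/fold_paper_1/line_reconstruction.py | are_opposite_directions
-- ===== SOURCE A (Python) =====
-- def are_opposite_directions(dir1, dir2):
--     """檢查兩個方向是否相對"""
--     opposite_pairs = [
--         ("right", "left"),
--         ("up", "down"),
--         ("up-right", "down-left"),
--         ("up-left", "down-right"),
--     ]
--
--     for d1, d2 in opposite_pairs:
--         if (dir1 == d1 and dir2 == d2) or (dir1 == d2 and dir2 == d1):
--             return True
--     return False
-- ===== SOURCE B (Python) =====
-- _CYCLE = ["right", "up-right", "up", "up-left", "left", "down-left", "down", "down-right"]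
--
-- def are_opposite_directions(dir1, dir2):
--     """檢查兩個方向是否相對"""
--     try:
--         i = _CYCLE.index(dir1)
--         j = _CYCLE.index(dir2)
--     except ValueError:
--         return False
--     return (i - j) % 8 == 4
-- ===== Notes on version B (the rewrite author's own statement) =====
-- stated objective: alternative
-- what changed: Replaced the scan of an opposite-pairs table by angle arithmetic on the 8-point compass cycle: each direction gets its index in a single circularly ordered list, and the pair is opposite iff the indices differ by 4 mod 8 (a half turn).
import Mathlib
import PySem

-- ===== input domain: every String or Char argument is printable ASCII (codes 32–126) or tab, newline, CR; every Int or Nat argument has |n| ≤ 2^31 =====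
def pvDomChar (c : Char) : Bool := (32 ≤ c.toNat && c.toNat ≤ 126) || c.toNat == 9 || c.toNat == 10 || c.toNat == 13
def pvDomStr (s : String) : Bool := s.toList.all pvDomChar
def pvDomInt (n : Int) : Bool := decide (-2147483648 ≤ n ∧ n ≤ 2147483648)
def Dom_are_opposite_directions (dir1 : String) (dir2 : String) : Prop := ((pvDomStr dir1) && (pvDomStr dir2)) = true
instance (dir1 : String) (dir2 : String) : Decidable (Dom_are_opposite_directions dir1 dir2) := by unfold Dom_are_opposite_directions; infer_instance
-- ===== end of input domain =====

-- B replaces A's scan of an opposite-pairs table with angle arithmetic on the 8-point compass cycle: opposite iff index difference is 4 mod 8 (alternative decomposition, same cost).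

-- ===== PORT A =====
-- loop over opposite_pairs with early return True
def pvLoopA (dir1 : String) (dir2 : String) : List (String × String) → Bool
  | [] => false
  | (d1, d2) :: rest =>
      if (dir1 == d1 && dir2 == d2) || (dir1 == d2 && dir2 == d1) then true
      else pvLoopA dir1 dir2 rest

def are_opposite_directions (dir1 : String) (dir2 : String) : Bool :=
  pvLoopA dir1 dir2
    [("right", "left"), ("up", "down"),
     ("up-right", "down-left"), ("up-left", "down-right")]

-- ===== PORT B =====
-- the 8 compass directions in circular (counter-clockwise) order
def pvCycle : List String :=
  ["right", "up-right", "up", "up-left", "left", "down-left", "down", "down-right"]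

def are_opposite_directions_alt (dir1 : String) (dir2 : String) : Bool :=
  match PySem.List.index? pvCycle dir1, PySem.List.index? pvCycle dir2 with
  | some i, some j => PySem.Int.mod ((i : Int) - (j : Int)) 8 == 4
  | _, _ => false

-- ===== PRECONDITION & SPEC =====
def Spec_are_opposite_directions (dir1 : String) (dir2 : String) (out : Bool) : Prop := out = are_opposite_directions_alt dir1 dir2
instance (dir1 : String) (dir2 : String) (out : Bool) : Decidable (Spec_are_opposite_directions dir1 dir2 out) := by unfold Spec_are_opposite_directions; infer_instance

-- ===== CLAIM =====
def Claim_equal_are_opposite_directions : Prop := ∀ (dir1 : String) (dir2 : String), Dom_are_opposite_directions dir1 dir2 → Spec_are_opposite_directions dir1 dir2 (are_opposite_directions dir1 dir2)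

-- ===== LEMMAS AND PROOFS =====
-- closed-form characterisation of the index lookup B performs on the compass cycle
theorem pvCycle_index_eq (s : String) : PySem.List.index? pvCycle s =
    (if s = "right" then some 0 else if s = "up-right" then some 1
     else if s = "up" then some 2 else if s = "up-left" then some 3
     else if s = "left" then some 4 else if s = "down-left" then some 5
     else if s = "down" then some 6 else if s = "down-right" then some 7
     else none) := by
  split_ifs <;> subst_vars <;>
    first
      | decide
      | (rw [PySem.List.index?_eq_none_iff]; simp only [pvCycle, List.mem_cons,
          List.not_mem_nil, or_false]; tauto)

-- ===== VERDICT =====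
set_option maxHeartbeats 1000000 in
theorem are_opposite_directions_spec : Claim_equal_are_opposite_directions := by
  intro dir1 dir2 _
  unfold Spec_are_opposite_directions are_opposite_directions are_opposite_directions_alt
  rw [pvCycle_index_eq dir1, pvCycle_index_eq dir2]
  split_ifs <;> subst_vars <;> first | decide | simp_all [pvLoopA]
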